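-- pv_equiv track=rewrite | github.com/hoonsor/global-skills | project-monitor/scripts/scan_skills.py | get_skill_summary
-- ===== SOURCE A (Python) =====
-- def get_skill_summary(body: str) -> str:
--     """從 body 內容提取技能功能概述（第一段非標題文字）。"""
--     lines = body.split("\n")
--     summary_lines = []
--     found_content = False
--
--     for line in lines:
--         stripped = line.strip()
--         if not stripped:
--             if found_content and summary_lines:
--                 break
--             continue
--         if stripped.startswith("#"):
--             if found_content and summary_lines:
--                 break
--             continue
--         found_content = True
--         summary_lines.append(stripped)
--
--     result = " ".join(summary_lines)
--     # 截斷過長的概述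
--     if len(result) > 300:
--         result = result[:297] + "..."
--     return result
-- ===== SOURCE B (Python) =====
-- def _first_para(stripped):
--     """Index arithmetic on a boolean content mask: locate the first content
--     line and the end of its contiguous run, then slice — no scanning loop."""
--     mask = [s != "" and not s.startswith("#") for s in stripped]
--     if True not in mask:
--         return []
--     i = mask.index(True)
--     tail = mask[i:]
--     j = i + (tail.index(False) if False in tail else len(tail))
--     return stripped[i:j]
--
-- def get_skill_summary(body: str) -> str:
--     stripped = [line.strip() for line in body.split("\n")]
--     result = " ".join(_first_para(stripped))
--     return result if len(result) <= 300 else result[:297] + "..."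
-- ===== Notes on version B (the rewrite author's own statement) =====
-- stated objective: alternative
-- what changed: Replaces A's stateful flag-and-break scanning loop by a loop-free staged computation: build a boolean content mask, find the first-True index and the first-False index in its tail with list.index, and take the paragraph as one slice.
import Mathlib
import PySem

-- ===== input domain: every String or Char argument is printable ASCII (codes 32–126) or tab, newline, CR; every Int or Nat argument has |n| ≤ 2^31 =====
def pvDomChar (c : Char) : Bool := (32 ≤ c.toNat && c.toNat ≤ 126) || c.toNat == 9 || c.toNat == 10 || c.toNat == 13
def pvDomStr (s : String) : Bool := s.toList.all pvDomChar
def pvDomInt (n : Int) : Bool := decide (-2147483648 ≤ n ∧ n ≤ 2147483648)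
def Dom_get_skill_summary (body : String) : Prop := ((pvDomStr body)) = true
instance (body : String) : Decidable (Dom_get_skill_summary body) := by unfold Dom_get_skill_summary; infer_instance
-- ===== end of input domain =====

-- B replaces A's flag-and-break scanning loop by index arithmetic on a boolean
-- content mask (index of first content line, index of the run's end, one slice);
-- same asymptotic cost, loop-free decomposition.

-- ===== PORT A =====
-- A's for-loop with break: structural recursion over the lines with state (summary_lines, found_content)
def pvLoopA : List String → List String → Bool → List String
  | [], acc, _ => acc
  | line :: rest, acc, found =>
    let stripped := PySem.Str.strip line
    if stripped = "" then
      if found && !acc.isEmpty then acc else pvLoopA rest acc found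
    else if PySem.Str.startswith stripped "#" then
      if found && !acc.isEmpty then acc else pvLoopA rest acc found
    else
      pvLoopA rest (acc ++ [stripped]) true

def get_skill_summary (body : String) : String :=
  let lines := (PySem.Str.split? body "\n").getD []   -- sep "\n" ≠ "", split? is some
  let result := PySem.Str.join " " (pvLoopA lines [] false)
  if PySem.Str.len result > 300 then
    PySem.Str.join "" [PySem.Str.slice result none (some 297), "..."]  -- result[:297] + "..."
  else result

-- ===== PORT B =====
def pvIsContent (s : String) : Bool := s ≠ "" && !(PySem.Str.startswith s "#")

-- Source B's _first_para: boolean mask, first-True index, first-False index in the tail, one slice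
def pvFirstPara (stripped : List String) : List String :=
  let mask := stripped.map pvIsContent
  if !mask.contains true then []
  else
    let i := (PySem.List.index? mask true).getD 0
    let tail := PySem.List.slice mask (some (i : Int)) none
    let j := i + (if tail.contains false then (PySem.List.index? tail false).getD 0 else tail.length)
    PySem.List.slice stripped (some (i : Int)) (some (j : Int))

def get_skill_summary_alt (body : String) : String :=
  let stripped := ((PySem.Str.split? body "\n").getD []).map PySem.Str.strip
  let result := PySem.Str.join " " (pvFirstPara stripped)
  if PySem.Str.len result ≤ 300 then result
  else PySem.Str.join "" [PySem.Str.slice result none (some 297), "..."]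

-- ===== PRECONDITION & SPEC =====
def Spec_get_skill_summary (body : String) (out : String) : Prop := out = get_skill_summary_alt body
instance (body : String) (out : String) : Decidable (Spec_get_skill_summary body out) := by unfold Spec_get_skill_summary; infer_instance

-- ===== CLAIM (what is proved, stated in full; the proofs are below) =====
def Claim_equal_get_skill_summary : Prop := ∀ (body : String), Dom_get_skill_summary body → Spec_get_skill_summary body (get_skill_summary body)

-- ===== LEMMAS AND PROOFS =====
-- Proof-side characterisation of the first paragraph: skip then collect.
def pvPhase2 : List String → List String
  | [] => []
  | s :: rest => if !(pvIsContent s) then [] else s :: pvPhase2 rest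

def pvPhase1 : List String → List String
  | [] => []
  | s :: rest => if pvIsContent s then s :: pvPhase2 rest else pvPhase1 rest

theorem pvLoopA_true (ss : List String) : ∀ acc : List String, acc ≠ [] →
    pvLoopA ss acc true = acc ++ pvPhase2 (ss.map PySem.Str.strip) := by
  induction ss with
  | nil => intro acc _; simp [pvLoopA, pvPhase2]
  | cons line rest ih =>
    intro acc hacc
    simp only [pvLoopA, List.map_cons, pvPhase2]
    by_cases h1 : PySem.Str.strip line = ""
    · simp [h1, pvIsContent, List.isEmpty_eq_false_iff.mpr hacc]
    · by_cases h2 : PySem.Chars.startswith (PySem.Chars.strip line.toList) ['#'] = true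
      · simp [h1, h2, pvIsContent, List.isEmpty_eq_false_iff.mpr hacc]
      · rw [ih (acc ++ [PySem.Str.strip line]) (by simp)]
        simp [h1, h2, pvIsContent]

theorem pvLoopA_false (ss : List String) :
    pvLoopA ss [] false = pvPhase1 (ss.map PySem.Str.strip) := by
  induction ss with
  | nil => simp [pvLoopA, pvPhase1]
  | cons line rest ih =>
    simp only [pvLoopA, List.map_cons, pvPhase1]
    by_cases h1 : PySem.Str.strip line = ""
    · simp [h1, pvIsContent, ih]
    · by_cases h2 : PySem.Chars.startswith (PySem.Chars.strip line.toList) ['#'] = true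
      · simp [h1, h2, pvIsContent, ih]
      · rw [show ([] ++ [PySem.Str.strip line]) = [PySem.Str.strip line] from rfl, pvLoopA_true rest [PySem.Str.strip line] (by simp)]
        simp [h1, h2, pvIsContent]

-- the run length computed from the mask takes exactly pvPhase2
theorem pvTake_run (ss : List String) :
    ss.take (if (ss.map pvIsContent).contains false then
               ((PySem.List.index? (ss.map pvIsContent) false).getD 0)
             else (ss.map pvIsContent).length) = pvPhase2 ss := by
  induction ss with
  | nil => simp [pvPhase2]
  | cons s rest ih =>
    by_cases h : pvIsContent s = true
    · have hmask : List.map pvIsContent (s :: rest) = true :: List.map pvIsContent rest := by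
        simp [h]
      have hcons : (true :: List.map pvIsContent rest).contains false
          = (List.map pvIsContent rest).contains false := by simp
      rw [hmask, hcons, PySem.List.index?_cons_of_ne _ (by simp)]
      by_cases hf : (List.map pvIsContent rest).contains false = true
      · rcases Option.isSome_iff_exists.mp ((PySem.List.index?_isSome_iff _ _).mpr
          (List.mem_of_elem_eq_true hf)) with ⟨k, hk⟩
        rw [if_pos hf, hk] at ih
        rw [if_pos hf, hk]
        simp [pvPhase2, h]
        simpa using ih
      · rw [if_neg hf] at ih
        rw [if_neg hf]
        simp [pvPhase2, h]
        simpa using ih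
    · simp only [Bool.not_eq_true] at h
      have hmask : List.map pvIsContent (s :: rest) = false :: List.map pvIsContent rest := by
        simp [h]
      rw [hmask, PySem.List.index?_cons_self]
      simp [pvPhase2, h]

theorem pvNoContent (ss : List String) (h : (ss.map pvIsContent).contains true = false) :
    pvPhase1 ss = [] := by
  induction ss with
  | nil => simp [pvPhase1]
  | cons s rest ih =>
    simp only [List.map_cons, List.contains_cons] at h
    rcases Bool.or_eq_false_iff.mp h with ⟨h1, h2⟩
    have hs : pvIsContent s = false := by
      cases hc : pvIsContent s <;> simp_all
    simp [pvPhase1, hs, ih h2]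

theorem pvFirstPara_eq (ss : List String) : pvFirstPara ss = pvPhase1 ss := by
  induction ss with
  | nil => simp [pvFirstPara, pvPhase1]
  | cons s rest ih =>
    by_cases h : pvIsContent s = true
    · have hct : (List.map pvIsContent (s :: rest)).contains true = true := by simp [h]
      have hmask : List.map pvIsContent (s :: rest) = true :: List.map pvIsContent rest := by
        simp [h]
      simp only [pvFirstPara, hct, Bool.not_true, Bool.false_eq_true, if_false]
      rw [hmask, PySem.List.index?_cons_self]
      simp only [Option.getD_some, Nat.cast_zero, PySem.List.slice_zero_start,
        PySem.List.slice_none_none, Nat.zero_add, PySem.List.slice_to_natCast]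
      rw [← hmask, pvTake_run (s :: rest)]
      simp [pvPhase1, pvPhase2, h]
    · simp only [Bool.not_eq_true] at h
      by_cases hc : (rest.map pvIsContent).contains true
      · rcases Option.isSome_iff_exists.mp ((PySem.List.index?_isSome_iff _ _).mpr
          (List.mem_of_elem_eq_true hc)) with ⟨i', hi'⟩
        have hA : pvFirstPara (s :: rest) = pvFirstPara rest := by
          have hmask : List.map pvIsContent (s :: rest) = false :: List.map pvIsContent rest := by
            simp [h]
          simp only [pvFirstPara, hmask, List.contains_cons, hc, Bool.or_true,
            Bool.not_true, Bool.false_eq_true, if_false]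
          rw [PySem.List.index?_cons_of_ne _ (by simp), hi']
          simp only [Option.map_some, Option.getD_some]
          rw [PySem.List.slice_from_natCast, PySem.List.slice_from_natCast, List.drop_succ_cons]
          have hslice : ∀ d : Nat,
              PySem.List.slice (s :: rest) (some ((i' + 1 : Nat) : Int)) (some (((i' + 1) + d : Nat) : Int))
                = PySem.List.slice rest (some ((i' : Nat) : Int)) (some ((i' + d : Nat) : Int)) := by
            intro d
            rw [PySem.List.slice_natCast, PySem.List.slice_natCast, List.drop_succ_cons]
            congr 1
            omega
          split <;> rw [hslice]
        rw [hA, ih]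
        simp [pvPhase1, h]
      · have hg : (List.map pvIsContent (s :: rest)).contains true = false := by
          simp only [List.map_cons, List.contains_cons, h]
          simpa using hc
        have : pvFirstPara (s :: rest) = [] := by
          simp only [pvFirstPara]
          rw [hg]
          simp
        rw [this, pvPhase1]
        simp [h, pvNoContent rest (by simpa using hc)]

theorem pvTrunc (r : String) :
    (if PySem.Str.len r > 300 then PySem.Str.join "" [PySem.Str.slice r none (some 297), "..."] else r)
      = (if PySem.Str.len r ≤ 300 then r else PySem.Str.join "" [PySem.Str.slice r none (some 297), "..."]) := by
  by_cases h : PySem.Str.len r ≤ 300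
  · rw [if_neg (by omega), if_pos h]
  · rw [if_pos (by omega), if_neg h]

-- ===== VERDICT (by name: the statement is the Claim_ definition above) =====
theorem get_skill_summary_spec : Claim_equal_get_skill_summary := by
  intro body _
  unfold Spec_get_skill_summary get_skill_summary get_skill_summary_alt
  simp only [pvLoopA_false, pvFirstPara_eq, pvTrunc]
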